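-- pv_equiv track=rewrite | github.com/ChrisGVE/workspace-qdrant-mcp | src/python/workspace_qdrant_mcp/tools/scratchbook.py | _generate_title_from_content
-- ===== SOURCE A (Python) =====
-- def _generate_title_from_content(content: str, max_length: int = 50) -> str:
--     """Generate a title from the content."""
--     # Take first line or first sentence
--     lines = content.strip().split("\n")
--     first_line = lines[0].strip()
--
--     if not first_line:
--         return "Untitled Note"
--
--     # If first line is too long, truncate at word boundary
--     if len(first_line) <= max_length:
--         return first_line
--
--     words = first_line.split()
--     title_words = []
--     current_length = 0
--
--     for word in words:
--         # Check if adding this word would exceed the limit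
--         word_length = len(word) + (
--             1 if title_words else 0
--         )  # +1 for space separator
--         if current_length + word_length > max_length - 3:  # Leave space for "..."
--             if title_words:
--                 title_words.append("...")
--             break
--         title_words.append(word)
--         current_length += word_length
--
--     return " ".join(title_words) if title_words else "Untitled Note"
-- ===== SOURCE B (Python) =====
-- def _generate_title_from_content(content: str, max_length: int = 50) -> str:
--     """Generate a title from the content."""
--     first_line = content.strip().split("\n")[0].strip()
--     if not first_line:
--         return "Untitled Note"
--     if len(first_line) <= max_length:
--         return first_line
--
--     # Prefix table: tab[i] = length of " ".join(words[:i+1])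
--     words = first_line.split()
--     tab = []
--     total = -1
--     for w in words:
--         total += len(w) + 1
--         tab.append(total)
--
--     # Largest prefix of words whose joined length fits the budget.
--     k = sum(1 for t in tab if t <= max_length - 3)
--     if k == 0:
--         return "Untitled Note"
--     if k == len(words):
--         return " ".join(words)
--     return " ".join(words[:k] + ["..."])
-- ===== Notes on version B (the rewrite author's own statement) =====
-- stated objective: alternative
-- what changed: Replaces A's early-break greedy loop over words (running length + conditional space accounting + in-loop ellipsis append) by a prefix-length table plus a count of fitting prefixes, assembling the result from words[:k] afterwards.
import Mathlib
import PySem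

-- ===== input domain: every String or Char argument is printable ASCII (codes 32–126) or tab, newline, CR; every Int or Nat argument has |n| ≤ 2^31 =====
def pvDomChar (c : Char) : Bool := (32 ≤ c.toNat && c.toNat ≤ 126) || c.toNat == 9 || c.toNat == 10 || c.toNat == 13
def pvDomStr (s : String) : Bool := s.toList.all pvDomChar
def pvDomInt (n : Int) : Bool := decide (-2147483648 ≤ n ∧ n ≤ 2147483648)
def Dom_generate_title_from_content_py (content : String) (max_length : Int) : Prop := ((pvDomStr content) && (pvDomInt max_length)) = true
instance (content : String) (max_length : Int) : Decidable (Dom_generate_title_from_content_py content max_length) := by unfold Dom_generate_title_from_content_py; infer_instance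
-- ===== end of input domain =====

-- B replaces A's early-break greedy word loop by a prefix-length table plus a count of
-- fitting prefixes (objective: alternative decomposition, same cost).

-- ===== PORT A =====
-- A's `for word in words: … break` loop, as structural recursion over the same state.
def pyA_loop (words title_words : List String) (current_length max_length : Int) : List String :=
  match words with
  | [] => title_words
  | w :: rest =>
    let word_length : Int := PySem.Str.len w + (if title_words = [] then 0 else 1)
    if current_length + word_length > max_length - 3 then
      if title_words = [] then title_words else title_words ++ ["..."]
    else pyA_loop rest (title_words ++ [w]) (current_length + word_length) max_length

def generate_title_from_content_py (content : String) (max_length : Int) : String :=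
  let lines := (PySem.Str.split? (PySem.Str.strip content) "\n").getD []
  let first_line := PySem.Str.strip (PySem.List.pyGetD lines 0 "")
  if first_line = "" then "Untitled Note"
  else if PySem.Str.len first_line ≤ max_length then first_line
  else
    let words := PySem.Str.split₀ first_line
    let title_words := pyA_loop words [] 0 max_length
    if title_words = [] then "Untitled Note" else PySem.Str.join " " title_words

-- ===== PORT B =====
-- B's prefix table: tab[i] = length of " ".join(words[:i+1]), built by one fold.
def pyB_tab (words : List String) : List Int :=
  (words.foldl (fun (acc : List Int × Int) w =>
      (acc.1 ++ [acc.2 + PySem.Str.len w + 1], acc.2 + PySem.Str.len w + 1)) ([], -1)).1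

def generate_title_from_content_py_alt (content : String) (max_length : Int) : String :=
  let first_line := PySem.Str.strip (PySem.List.pyGetD ((PySem.Str.split? (PySem.Str.strip content) "\n").getD []) 0 "")
  if first_line = "" then "Untitled Note"
  else if PySem.Str.len first_line ≤ max_length then first_line
  else
    let words := PySem.Str.split₀ first_line
    let tab := pyB_tab words
    let k : Int := tab.foldl (fun acc t => if t ≤ max_length - 3 then acc + 1 else acc) 0
    if k = 0 then "Untitled Note"
    else if k = PySem.List.len words then PySem.Str.join " " words
    else PySem.Str.join " " (PySem.List.slice words none (some k) ++ ["..."])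

-- ===== PRECONDITION & SPEC =====
def Spec_generate_title_from_content_py (content : String) (max_length : Int) (out : String) : Prop := out = generate_title_from_content_py_alt content max_length
instance (content : String) (max_length : Int) (out : String) : Decidable (Spec_generate_title_from_content_py content max_length out) := by unfold Spec_generate_title_from_content_py; infer_instance

-- ===== CLAIM (what is proved, stated in full; the proofs are below) =====
def Claim_equal_generate_title_from_content_py : Prop := ∀ (content : String) (max_length : Int), Dom_generate_title_from_content_py content max_length → Spec_generate_title_from_content_py content max_length (generate_title_from_content_py content max_length)

-- ===== LEMMAS AND PROOFS =====

-- the running totals B's fold appends, in recursive form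
def pvTabList (ws : List String) (tot : Int) : List Int :=
  match ws with
  | [] => []
  | w :: rest => (tot + (w.length : Int) + 1) :: pvTabList rest (tot + (w.length : Int) + 1)

theorem pvLen_eq (w : String) : PySem.Str.len w = (w.length : Int) := by
  simp

theorem pvTab_eq (ws : List String) : ∀ (acc : List Int) (tot : Int),
    (ws.foldl (fun (acc : List Int × Int) w =>
      (acc.1 ++ [acc.2 + PySem.Str.len w + 1], acc.2 + PySem.Str.len w + 1)) (acc, tot)).1
    = acc ++ pvTabList ws tot := by
  induction ws with
  | nil => intro acc tot; simp [pvTabList]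
  | cons w rest ih =>
    intro acc tot
    rw [List.foldl_cons, ih, pvTabList, pvLen_eq]
    simp

theorem pvTabList_length (ws : List String) : ∀ tot, (pvTabList ws tot).length = ws.length := by
  induction ws with
  | nil => intro tot; simp [pvTabList]
  | cons w rest ih => intro tot; simp [pvTabList, ih]

theorem pvTab_mono_zero (ws : List String) : ∀ (tot b : Int), b < tot →
    (pvTabList ws tot).countP (fun t => decide (t ≤ b)) = 0 := by
  induction ws with
  | nil => intro tot b _; simp [pvTabList]
  | cons w rest ih =>
    intro tot b h
    have h' : b < tot + (w.length : Int) + 1 := by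
      have : (0 : Int) ≤ (w.length : Int) := by exact_mod_cast Nat.zero_le _
      omega
    rw [pvTabList, List.countP_cons, ih _ _ h']
    simp; omega

theorem pvTab_count_le (ws : List String) (tot b : Int) :
    (pvTabList ws tot).countP (fun t => decide (t ≤ b)) ≤ ws.length := by
  calc (pvTabList ws tot).countP (fun t => decide (t ≤ b))
      ≤ (pvTabList ws tot).length := List.countP_le_length
    _ = ws.length := pvTabList_length ws tot

-- A's loop with nonempty title_words, characterised by B's prefix count
theorem pyA_loop_eq (ws : List String) : ∀ (tw : List String) (cl m : Int), tw ≠ [] →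
    pyA_loop ws tw cl m =
      (if (pvTabList ws cl).countP (fun t => decide (t ≤ m - 3)) = ws.length
       then tw ++ ws
       else tw ++ ws.take ((pvTabList ws cl).countP (fun t => decide (t ≤ m - 3))) ++ ["..."]) := by
  induction ws with
  | nil => intro tw cl m htw; simp [pyA_loop, pvTabList]
  | cons w rest ih =>
    intro tw cl m htw
    have hcnt := pvTab_count_le rest (cl + (w.length : Int) + 1) (m - 3)
    rw [pyA_loop]
    simp only [htw, if_false, pvLen_eq]
    have harith : cl + ((w.length : Int) + 1) = cl + (w.length : Int) + 1 := by ring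
    by_cases hfit : cl + (w.length : Int) + 1 ≤ m - 3
    · rw [if_neg (by omega : ¬ (cl + ((w.length : Int) + 1) > m - 3)), harith,
        ih (tw ++ [w]) (cl + (w.length : Int) + 1) m (by simp)]
      rw [pvTabList]
      simp only [List.countP_cons, decide_eq_true_eq, if_pos hfit]
      by_cases hall : (pvTabList rest (cl + (w.length : Int) + 1)).countP (fun t => decide (t ≤ m - 3)) = rest.length
      · rw [if_pos hall, if_pos (by simp [hall])]
        simp
      · rw [if_neg hall, if_neg (by simpa using hall)]
        simp [List.take_succ_cons]
    · rw [if_pos (by omega : cl + ((w.length : Int) + 1) > m - 3)]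
      have h0 : (pvTabList (w :: rest) cl).countP (fun t => decide (t ≤ m - 3)) = 0 := by
        rw [pvTabList, List.countP_cons,
          pvTab_mono_zero rest (cl + (w.length : Int) + 1) (m - 3) (by omega)]
        simp; omega
      rw [h0, if_neg (by simp)]
      simp

-- B's fold-based count equals the countP of the tab list
theorem pyB_count_eq (tab : List Int) (b : Int) :
    tab.foldl (fun acc t => if t ≤ b then acc + 1 else acc) (0 : Int)
      = (tab.countP (fun t => decide (t ≤ b)) : Int) := by
  have := PySem.List.foldl_if_add_one (fun t => decide (t ≤ b)) tab (0 : Int)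
  simpa using this

-- the two tails (after both guards fail) agree
theorem tail_eq (words : List String) (m : Int) :
    (if pyA_loop words [] 0 m = [] then "Untitled Note"
     else PySem.Str.join " " (pyA_loop words [] 0 m)) =
    (let tab := pyB_tab words
     let k : Int := tab.foldl (fun acc t => if t ≤ m - 3 then acc + 1 else acc) 0
     if k = 0 then "Untitled Note"
     else if k = PySem.List.len words then PySem.Str.join " " words
     else PySem.Str.join " " (PySem.List.slice words none (some k) ++ ["..."])) := by
  have htab : pyB_tab words = pvTabList words (-1) := by
    unfold pyB_tab; rw [pvTab_eq]; simp
  simp only [htab, pyB_count_eq]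
  rcases words with _ | ⟨w, rest⟩
  · simp [pyA_loop, pvTabList]
  · have hw : (0:Int) ≤ (w.length : Int) := by exact_mod_cast Nat.zero_le _
    have hfirst : (-1:Int) + (w.length:Int) + 1 = (w.length:Int) := by ring
    by_cases hfit : (w.length : Int) ≤ m - 3
    · have hloop : pyA_loop (w :: rest) [] 0 m = pyA_loop rest [w] ((w.length:Int)) m := by
        simp only [pyA_loop, pvLen_eq]
        rw [if_neg (by simp; omega)]
        simp
      set c' := (pvTabList rest ((w.length:Int))).countP (fun t => decide (t ≤ m - 3)) with hc'
      have hcle := pvTab_count_le rest ((w.length:Int)) (m - 3)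
      have hcount : (pvTabList (w :: rest) (-1)).countP (fun t => decide (t ≤ m - 3)) = c' + 1 := by
        rw [pvTabList, hfirst, List.countP_cons, ← hc']
        simp [hfit]
      rw [hloop, pyA_loop_eq rest [w] ((w.length:Int)) m (by simp), hcount, ← hc']
      by_cases hall : c' = rest.length
      · rw [if_pos hall, if_neg (by simp)]
        rw [if_neg (by push_cast; omega)]
        rw [if_pos (by simp [PySem.List.len_eq, hall])]
        simp
      · rw [if_neg hall, if_neg (by simp)]
        rw [if_neg (by push_cast; omega)]
        rw [if_neg (by simp [PySem.List.len_eq]; omega)]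
        rw [PySem.List.slice_to _ (by omega : (0:Int) ≤ ((c' + 1 : Nat) : Int))]
        have htoNat : (((c' + 1 : Nat) : Int)).toNat = c' + 1 := by omega
        rw [htoNat]
        simp [List.take_succ_cons]
    · have hloop : pyA_loop (w :: rest) [] 0 m = [] := by
        simp only [pyA_loop, pvLen_eq]
        rw [if_pos (by simp; omega)]
        simp
      have hcount : (pvTabList (w :: rest) (-1)).countP (fun t => decide (t ≤ m - 3)) = 0 := by
        rw [pvTabList, hfirst, List.countP_cons,
          pvTab_mono_zero rest ((w.length:Int)) (m - 3) (by omega)]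
        simp; omega
      rw [hloop, hcount]
      simp

-- ===== VERDICT (by name: the statement is the Claim_ definition above) =====
theorem generate_title_from_content_py_spec : Claim_equal_generate_title_from_content_py := by
  intro content max_length _
  unfold Spec_generate_title_from_content_py generate_title_from_content_py generate_title_from_content_py_alt
  simp only []
  by_cases h1 : PySem.Str.strip (PySem.List.pyGetD ((PySem.Str.split? (PySem.Str.strip content) "\n").getD []) 0 "") = ""
  · simp [h1]
  · rw [if_neg h1, if_neg h1]
    by_cases h2 : PySem.Str.len (PySem.Str.strip (PySem.List.pyGetD ((PySem.Str.split? (PySem.Str.strip content) "\n").getD []) 0 "")) ≤ max_length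
    · rw [if_pos h2, if_pos h2]
    · rw [if_neg h2, if_neg h2]
      exact tail_eq _ max_length
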